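-- pv_equiv track=rewrite | github.com/Akgop/Problem-Solving | Binary_Search/thisiscote_binarysearch_q30.py | my_bisect_right
-- ===== SOURCE A (Python) =====
-- def query_token(query, flag):
--     idx = 0
--     for i in range(len(query)):
--         if query[i] == "?" and flag:
--             idx = i
--             break
--         if query[i] != "?" and not flag:
--             idx = i
--             break
--     if flag:
--         return query[:idx], idx
--     else:
--         tmp = query[idx:]
--         return tmp[::-1], len(query) - idx
--
-- def my_bisect_right(li, query, flag):
--     # 쿼리 가공
--     n = len(query)
--     target, idx = query_token(query, flag)
--     # 시작과 끝
--     answer = -1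
--     start, end = 0, len(li) - 1
--     while start <= end:
--         mid = (start + end) // 2
--         if len(li[mid]) < n:
--             start = mid + 1
--         elif len(li[mid]) > n:
--             end = mid - 1
--         else:
--             if li[mid][:idx] <= target:
--                 start = mid + 1
--                 answer = mid
--             else:
--                 end = mid - 1
--     return answer
-- ===== SOURCE B (Python) =====
-- def query_token(query, flag):
--     if flag:
--         idx = next((i for i, ch in enumerate(query) if ch == "?"), 0)
--         return query[:idx], idx
--     leading = len(query) - len(query.lstrip("?"))
--     idx = leading if leading < len(query) else 0
--     return query[idx:][::-1], len(query) - idx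
--
--
-- def my_bisect_right(li, query, flag):
--     n = len(query)
--     target, idx = query_token(query, flag)
--
--     def search(seg, offset, best):
--         if not seg:
--             return best
--         m = (len(seg) - 1) // 2
--         s = seg[m]
--         if len(s) < n:
--             return search(seg[m + 1:], offset + m + 1, best)
--         if len(s) > n:
--             return search(seg[:m], offset, best)
--         if s[:idx] <= target:
--             return search(seg[m + 1:], offset + m + 1, offset + m)
--         return search(seg[:m], offset, best)
--
--     return search(li, 0, -1)
-- ===== Notes on version B (the rewrite author's own statement) =====
-- stated objective: alternative
-- what changed: The index-based while loop becomes structural recursion on list segments (recursing into seg[:m] / seg[m+1:] with an offset and best accumulator), and query_token's break-scan is replaced by a stdlib first-match generator / lstrip computation.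
import Mathlib
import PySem

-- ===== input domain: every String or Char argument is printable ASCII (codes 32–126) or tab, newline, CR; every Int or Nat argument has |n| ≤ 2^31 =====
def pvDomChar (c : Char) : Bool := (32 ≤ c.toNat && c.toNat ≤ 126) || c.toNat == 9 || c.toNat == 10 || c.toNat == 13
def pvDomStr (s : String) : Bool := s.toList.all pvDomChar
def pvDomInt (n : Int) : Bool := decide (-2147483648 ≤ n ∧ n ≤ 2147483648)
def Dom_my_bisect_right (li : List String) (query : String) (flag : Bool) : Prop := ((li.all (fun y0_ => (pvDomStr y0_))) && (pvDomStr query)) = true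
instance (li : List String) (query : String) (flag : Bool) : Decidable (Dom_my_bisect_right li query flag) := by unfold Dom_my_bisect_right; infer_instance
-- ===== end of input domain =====

-- B replaces A's index-based while loop by structural recursion on list segments and A's
-- break-scan in query_token by stdlib first-match/lstrip; objective: alternative decomposition.

-- ===== PORT A =====
-- the for-loop of query_token with its two break conditions; returns 0 if no break fires
def qtScan (cs : List Char) (flag : Bool) (i : Nat) : Nat :=
  match cs with
  | [] => 0
  | c :: rest =>
    if c == '?' && flag then i
    else if !(c == '?') && !flag then i
    else qtScan rest flag (i + 1)

-- strings are handled as their code-point lists (PySem style); tmp[::-1] is List.reverse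
-- (PySem.List.slice?_none_none_neg_one)
def query_token (query : String) (flag : Bool) : List Char × Int :=
  let idx : Nat := qtScan query.toList flag 0
  if flag then
    (PySem.List.slice query.toList none (some (idx : Int)), (idx : Int))
  else
    let tmp := PySem.List.slice query.toList (some (idx : Int)) none
    (tmp.reverse, (query.toList.length : Int) - (idx : Int))

-- the while loop of A, fuel = one more than the loop's measure (end-start+1), a totality
-- guard only: li[mid] is in range whenever the loop runs (0 <= start <= mid <= end < len)
def loopA (li : List String) (n : Int) (target : List Char) (idx : Int) :
    Nat → Int → Int → Int → Int
  | 0, _, _, answer => answer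
  | fuel + 1, start, end_, answer =>
    if start ≤ end_ then
      let mid := PySem.Int.floordiv (start + end_) 2
      let s := PySem.List.pyGetD li mid ""
      if PySem.Str.len s < n then loopA li n target idx fuel (mid + 1) end_ answer
      else if PySem.Str.len s > n then loopA li n target idx fuel start (mid - 1) answer
      else if PySem.List.slice s.toList none (some idx) ≤ target then
        loopA li n target idx fuel (mid + 1) end_ mid
      else loopA li n target idx fuel start (mid - 1) answer
    else answer

def my_bisect_right (li : List String) (query : String) (flag : Bool) : Int :=
  let n := PySem.Str.len query
  let td := query_token query flag
  loopA li n td.1 td.2 (li.length + 1) 0 (PySem.List.len li - 1) (-1)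

-- ===== PORT B =====
def query_token_alt (query : String) (flag : Bool) : List Char × Int :=
  if flag then
    -- next((i for i, ch in enumerate(query) if ch == "?"), 0)
    let idx : Nat := match query.toList.findIdx? (· == '?') with | some j => j | none => 0
    (PySem.List.slice query.toList none (some (idx : Int)), (idx : Int))
  else
    -- query.lstrip("?") drops the leading '?' characters: ported by hand as dropWhile (exact)
    let leading : Nat := query.toList.length - (query.toList.dropWhile (· == '?')).length
    let idx : Nat := if leading < query.toList.length then leading else 0
    ((PySem.List.slice query.toList (some (idx : Int)) none).reverse,
      (query.toList.length : Int) - (idx : Int))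

-- recursion on segments; fuel = one more than the segment length, a totality guard only
def searchB (n : Int) (target : List Char) (idx : Int) :
    Nat → List String → Int → Int → Int
  | 0, _, _, best => best
  | fuel + 1, seg, offset, best =>
    if seg = [] then best
    else
      let m : Nat := (seg.length - 1) / 2
      let s := PySem.List.pyGetD seg (m : Int) ""
      if PySem.Str.len s < n then
        searchB n target idx fuel (PySem.List.slice seg (some ((m : Int) + 1)) none) (offset + (m : Int) + 1) best
      else if PySem.Str.len s > n then
        searchB n target idx fuel (PySem.List.slice seg none (some (m : Int))) offset best
      else if PySem.List.slice s.toList none (some idx) ≤ target then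
        searchB n target idx fuel (PySem.List.slice seg (some ((m : Int) + 1)) none) (offset + (m : Int) + 1) (offset + (m : Int))
      else
        searchB n target idx fuel (PySem.List.slice seg none (some (m : Int))) offset best

def my_bisect_right_alt (li : List String) (query : String) (flag : Bool) : Int :=
  let n := PySem.Str.len query
  let td := query_token_alt query flag
  searchB n td.1 td.2 (li.length + 1) li 0 (-1)

-- ===== PRECONDITION & SPEC =====
def Spec_my_bisect_right (li : List String) (query : String) (flag : Bool) (out : Int) : Prop := out = my_bisect_right_alt li query flag
instance (li : List String) (query : String) (flag : Bool) (out : Int) : Decidable (Spec_my_bisect_right li query flag out) := by unfold Spec_my_bisect_right; infer_instance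

-- ===== CLAIM (what is proved, stated in full; the proofs are below) =====
def Claim_equal_my_bisect_right : Prop := ∀ (li : List String) (query : String) (flag : Bool), Dom_my_bisect_right li query flag → Spec_my_bisect_right li query flag (my_bisect_right li query flag)

-- ===== LEMMAS AND PROOFS =====

lemma qtScan_true (cs : List Char) : ∀ i : Nat,
    qtScan cs true i = (match cs.findIdx? (· == '?') with | some j => i + j | none => 0) := by
  induction cs with
  | nil => intro i; simp [qtScan]
  | cons c rest ih =>
    intro i
    by_cases hc : c = '?'
    · simp [qtScan, hc, List.findIdx?_cons]
    · rw [qtScan]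
      simp only [hc, List.findIdx?_cons, beq_iff_eq, Bool.and_true, if_false, ih (i + 1)]
      simp
      cases h : rest.findIdx? (· == '?') <;> simp
      ring

lemma qtScan_false (cs : List Char) : ∀ i : Nat,
    qtScan cs false i =
      (if (cs.dropWhile (· == '?')).length = 0 then 0
       else i + (cs.takeWhile (· == '?')).length) := by
  induction cs with
  | nil => intro i; simp [qtScan]
  | cons c rest ih =>
    intro i
    by_cases hc : c = '?'
    · rw [qtScan]
      simp [hc, ih (i + 1)]
      split <;> omega
    · rw [qtScan]
      simp [hc]

lemma qt_eq (query : String) (flag : Bool) :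
    query_token query flag = query_token_alt query flag := by
  cases flag
  · have hidx : qtScan query.toList false 0 =
        (let leading : Nat := query.toList.length - (query.toList.dropWhile (· == '?')).length
         if leading < query.toList.length then leading else 0) := by
      rw [qtScan_false]
      have hsp := List.takeWhile_append_dropWhile (p := (· == '?')) (l := query.toList)
      have hlen : (query.toList.takeWhile (· == '?')).length
          + (query.toList.dropWhile (· == '?')).length = query.toList.length := by
        conv_rhs => rw [← hsp]
        rw [List.length_append]
      simp only []
      split <;> split <;> omega
    simp [query_token, query_token_alt, hidx]
  · have hidx : qtScan query.toList true 0 =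
        (match query.toList.findIdx? (· == '?') with | some j => j | none => 0) := by
      rw [qtScan_true]
      cases h : query.toList.findIdx? (· == '?') <;> simp
    simp [query_token, query_token_alt, hidx]

lemma loop_eq_search (li : List String) (n : Int) (target : List Char) (idx : Int) :
    ∀ (k : Nat) (lo hi ans : Int), (hi + 1 - lo).toNat ≤ k → 0 ≤ lo → lo - 1 ≤ hi →
      hi < (li.length : Int) →
      loopA li n target idx k lo hi ans
        = searchB n target idx k ((li.drop lo.toNat).take (hi + 1 - lo).toNat) lo ans := by
  intro k
  induction k with
  | zero => intro lo hi ans hk h0 hlo hhi; rfl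
  | succ k ih =>
    intro lo hi ans hk h0 hlo hhi
    by_cases hle : lo ≤ hi
    · -- segment facts
      set seg := (li.drop lo.toNat).take (hi + 1 - lo).toNat with hseg
      have hlen : seg.length = (hi + 1 - lo).toNat := by
        rw [hseg]; simp [List.length_take, List.length_drop]; omega
      have hne : seg ≠ [] := by
        intro hnil; rw [hnil] at hlen; simp at hlen; omega
      set m : Nat := (seg.length - 1) / 2 with hm
      have hm2 : m = ((hi + 1 - lo).toNat - 1) / 2 := by rw [hm, hlen]
      have hmid : PySem.Int.floordiv (lo + hi) 2 = lo + (m : Int) := by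
        rw [PySem.Int.floordiv_eq_ediv_of_pos (a := lo + hi) (b := 2) (by norm_num)]
        omega
      have hmL : m < seg.length := by omega
      have hmle : (m : Int) ≤ hi - lo := by omega
      have hA : (0:Int) ≤ lo + (m : Int) := by omega
      have hB : lo + (m : Int) < (li.length : Int) := by omega
      have hsameElem : PySem.List.pyGetD li (lo + (m : Int)) ""
          = PySem.List.pyGetD seg (m : Int) "" := by
        rw [PySem.List.pyGetD_eq_getElem li "" hA hB]
        rw [PySem.List.pyGetD_natCast]
        rw [List.getD_eq_getElem _ _ hmL]
        have hidx : (lo + (m:Int)).toNat = lo.toNat + m := by omega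
        simp only [hseg, List.getElem_take, List.getElem_drop, hidx]
      have hdropEq : PySem.List.slice seg (some ((m : Int) + 1)) none
          = (li.drop ((lo + (m:Int)) + 1).toNat).take ((hi + 1 - ((lo + (m:Int)) + 1))).toNat := by
        rw [PySem.List.slice_from seg (show (0:Int) ≤ (m:Int) + 1 by positivity)]
        rw [hseg, List.drop_take, List.drop_drop]
        have e1 : (hi + 1 - lo).toNat - ((m:Int) + 1).toNat = (hi + 1 - (lo + (m:Int) + 1)).toNat := by
          omega
        have e2 : lo.toNat + ((m:Int) + 1).toNat = (lo + (m:Int) + 1).toNat := by omega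
        rw [e1, e2]
      have htakeEq : PySem.List.slice seg none (some (m : Int))
          = (li.drop lo.toNat).take (((lo + (m:Int)) - 1) + 1 - lo).toNat := by
        rw [PySem.List.slice_to seg (show (0:Int) ≤ (m:Int) by positivity)]
        rw [hseg, List.take_take]
        congr 1
        omega
      rw [loopA, searchB, if_pos hle, if_neg hne]
      simp only [← hm, hmid, hsameElem]
      split
      · rw [hdropEq]
        rw [ih (lo + (m:Int) + 1) hi ans (by omega) (by omega) (by omega) hhi]
      · split
        · rw [htakeEq]
          rw [ih lo (lo + (m:Int) - 1) ans (by omega) (by omega) (by omega) (by omega)]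
        · split
          · rw [hdropEq]
            rw [ih (lo + (m:Int) + 1) hi (lo + (m:Int)) (by omega) (by omega) (by omega) hhi]
          · rw [htakeEq]
            rw [ih lo (lo + (m:Int) - 1) ans (by omega) (by omega) (by omega) (by omega)]
    · have hz : (hi + 1 - lo).toNat = 0 := by omega
      rw [loopA, searchB, if_neg hle, if_pos (by simp [hz])]

-- ===== VERDICT (by name: the statement is the Claim_ definition above) =====
theorem my_bisect_right_spec : Claim_equal_my_bisect_right := by
  intro li query flag _
  unfold Spec_my_bisect_right my_bisect_right my_bisect_right_alt
  rw [qt_eq]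
  have h := loop_eq_search li (PySem.Str.len query) (query_token_alt query flag).1
      (query_token_alt query flag).2 (li.length + 1) 0 ((PySem.List.len li) - 1) (-1)
      (by simp [PySem.List.len_eq]) (by omega) (by simp [PySem.List.len_eq]; omega)
      (by simp [PySem.List.len_eq])
  rw [h]
  have hli : ((li.drop (0:Int).toNat).take ((PySem.List.len li) - 1 + 1 - 0).toNat) = li := by
    simp [PySem.List.len_eq]
  rw [hli]
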